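-- pv_equiv track=rewrite | github.com/Omega97/omar_utils | iter_utils.py | exp_iter
-- ===== SOURCE A (Python) =====
-- def exp_iter(itr):
--     """iterable yields exponentially less frequently"""
--     count = 0
--     n = 0
--     for i, e in enumerate(itr):
--         if i == n:
--             yield e
--             count += 1
--             n = 2 ** count - 1
-- ===== SOURCE B (Python) =====
-- def exp_iter(itr):
--     """iterable yields exponentially less frequently"""
--     seq = list(itr)
--     i = 0
--     while i < len(seq):
--         yield seq[i]
--         i = 2 * i + 1
-- ===== Notes on version B (the rewrite author's own statement) =====
-- stated objective: simpler
-- what changed: B materialises the input once and jumps directly between the target indices via i -> 2*i+1 instead of A's enumerate-every-element-and-compare-to-the-next-target loop.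
import Mathlib
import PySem

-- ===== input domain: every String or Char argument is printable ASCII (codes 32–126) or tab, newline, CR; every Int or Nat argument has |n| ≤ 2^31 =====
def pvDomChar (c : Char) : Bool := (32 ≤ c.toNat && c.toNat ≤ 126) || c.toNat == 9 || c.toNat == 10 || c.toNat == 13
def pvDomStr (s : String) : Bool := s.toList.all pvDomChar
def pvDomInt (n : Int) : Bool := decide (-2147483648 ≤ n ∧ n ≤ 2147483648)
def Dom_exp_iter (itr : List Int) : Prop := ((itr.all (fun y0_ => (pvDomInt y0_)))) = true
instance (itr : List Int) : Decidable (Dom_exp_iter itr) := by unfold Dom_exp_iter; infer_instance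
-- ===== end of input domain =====

-- B yields the elements at indices 0,1,3,7,… by jumping i ← 2*i+1 directly instead of
-- scanning every element with enumerate and comparing against the next target (objective: simpler).

-- ===== PORT A =====
-- the for-loop over enumerate(itr) with state (count, n): recursion over the list carrying the index i
def expAGo : List Int → Nat → Nat → Int → List Int
  | [], _, _, _ => []
  | e :: rest, i, count, n =>
    if (i : Int) = n then e :: expAGo rest (i + 1) (count + 1) ((2 : Int) ^ (count + 1) - 1)
    else expAGo rest (i + 1) count n

def exp_iter (itr : List Int) : List Int := expAGo itr 0 0 0

-- ===== PORT B =====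
-- while i < len(seq): yield seq[i]; i = 2*i+1
def expBGo (seq : List Int) (i : Nat) : List Int :=
  if h : i < seq.length then seq[i] :: expBGo seq (2 * i + 1) else []
termination_by seq.length - i
decreasing_by omega

def exp_iter_alt (itr : List Int) : List Int := expBGo itr 0

-- ===== PRECONDITION & SPEC =====
def Spec_exp_iter (itr : List Int) (out : List Int) : Prop := out = exp_iter_alt itr
instance (itr : List Int) (out : List Int) : Decidable (Spec_exp_iter itr out) := by unfold Spec_exp_iter; infer_instance

-- ===== CLAIM (what is proved, stated in full; the proofs are below) =====
def Claim_equal_exp_iter : Prop := ∀ (itr : List Int), Dom_exp_iter itr → Spec_exp_iter itr (exp_iter itr)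

-- ===== LEMMAS AND PROOFS =====

-- A's loop just skips d elements while i < n
theorem expAGo_skip (d : Nat) : ∀ (xs : List Int) (i count : Nat) (n : Int),
    n = (i : Int) + d → expAGo xs i count n = expAGo (xs.drop d) (i + d) count n := by
  induction d with
  | zero => intro xs i count n _; simp
  | succ d ih =>
    intro xs i count n hn
    cases xs with
    | nil => simp [expAGo]
    | cons x rest =>
      have hne : ((i : Int) ≠ n) := by omega
      simp only [expAGo, if_neg hne, List.drop_succ_cons]
      have := ih rest (i + 1) count n (by push_cast; omega)
      rw [this]
      congr 1
      omega

theorem expAGo_eq_expBGo (seq : List Int) : ∀ (k i count : Nat),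
    seq.length - i ≤ k → i = 2 ^ count - 1 →
    expAGo (seq.drop i) i count ((2 : Int) ^ count - 1) = expBGo seq i := by
  intro k
  induction k with
  | zero =>
    intro i count hk hi
    have hlen : seq.length ≤ i := by omega
    rw [List.drop_eq_nil_of_le hlen]
    rw [expBGo]
    simp [expAGo, Nat.not_lt.mpr hlen]
  | succ k ih =>
    intro i count hk hi
    by_cases h : i < seq.length
    · have hpow : (1 : Nat) ≤ 2 ^ count := Nat.one_le_two_pow
      have hdrop : seq.drop i = seq[i] :: seq.drop (i + 1) :=
        List.drop_eq_getElem_cons h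
      have hcast : ((i : Int)) = (2 : Int) ^ count - 1 := by
        subst hi; push_cast [hpow]; ring
      rw [hdrop]
      rw [expBGo, dif_pos h]
      simp only [expAGo, if_pos hcast]
      congr 1
      -- skip from i+1 to the next target 2^(count+1)-1
      have hd : (2 : Int) ^ (count + 1) - 1 = ((i + 1 : Nat) : Int) + ((2 ^ count - 1 : Nat) : Int) := by
        subst hi; push_cast [hpow]; ring
      rw [expAGo_skip (2 ^ count - 1) (seq.drop (i + 1)) (i + 1) (count + 1) _ hd]
      rw [List.drop_drop]
      have hidx : (i + 1) + (2 ^ count - 1) = 2 * i + 1 := by omega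
      have hidx2 : 2 * i + 1 = 2 ^ (count + 1) - 1 := by
        subst hi; rw [Nat.pow_succ]; omega
      rw [hidx]
      exact ih (2 * i + 1) (count + 1) (by omega) hidx2
    · have hlen : seq.length ≤ i := by omega
      rw [List.drop_eq_nil_of_le hlen]
      rw [expBGo]
      simp [expAGo, Nat.not_lt.mpr hlen]

-- ===== VERDICT (by name: the statement is the Claim_ definition above) =====
theorem exp_iter_spec : Claim_equal_exp_iter := by
  intro itr _
  unfold Spec_exp_iter exp_iter exp_iter_alt
  have := expAGo_eq_expBGo itr itr.length 0 0 (by omega) (by norm_num)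
  simpa using this
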